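-- pv_equiv track=rewrite | github.com/maperri/CNLWizard | src/CNLWizard/CNLWizard.py | _split_terminal_symbols
-- ===== SOURCE A (Python) =====
-- def _split_terminal_symbols(body: str) -> str:
--     """
--     Given a rule, split all terminal symbols into unit symbols.
--     This transformation is used to prevent lark from printing __ANON_ in parsing errors.
--     """
--     i = 0
--     res = ''
--     while i < len(body):
--         if body[i] == '"':
--             start = i
--             end = start+1
--             while end < len(body) and body[end] != '"':
--                 end += 1
--             token = body[start+1:end].split(' ')
--             for word in range(len(token)):
--                 if token[word]:
--                     token[word] = f'"{token[word]}"'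
--             res += ' '.join(token)
--             i = end
--         else:
--             res += body[i]
--         i += 1
--     return res
-- ===== SOURCE B (Python) =====
-- def _split_terminal_symbols(body: str) -> str:
--     parts = body.split('"')
--     out = []
--     for i, part in enumerate(parts):
--         if i % 2 == 0:
--             out.append(part)
--         else:
--             out.append(' '.join(f'"{w}"' if w else w for w in part.split(' ')))
--     return ''.join(out)
-- ===== Notes on version B (the rewrite author's own statement) =====
-- stated objective: simpler
-- what changed: Replaces the index-driven while loop with its hand-rolled inner scan for the closing quote by one split('"') pass whose odd-indexed parts (quoted contents) get the per-word wrapping and even-indexed parts pass through verbatim.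
import Mathlib
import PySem

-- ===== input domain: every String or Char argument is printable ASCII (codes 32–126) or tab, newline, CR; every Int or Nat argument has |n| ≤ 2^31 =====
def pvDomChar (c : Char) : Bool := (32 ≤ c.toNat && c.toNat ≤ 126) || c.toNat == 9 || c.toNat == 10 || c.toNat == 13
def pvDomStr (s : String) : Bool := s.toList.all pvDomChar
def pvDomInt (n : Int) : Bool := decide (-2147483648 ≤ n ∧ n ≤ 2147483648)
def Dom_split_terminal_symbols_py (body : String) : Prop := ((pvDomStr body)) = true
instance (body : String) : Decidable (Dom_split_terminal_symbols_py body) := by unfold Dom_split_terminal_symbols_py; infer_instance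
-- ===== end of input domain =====

-- B replaces A's index/while scan by one split('"') pass with parity-indexed parts (simpler decomposition, same cost).

-- ===== PORT A =====
-- the for-loop over token indices that wraps each non-empty word in quotes (token[word] = f'"{token[word]}"')
def pvAWrap (ws : List (List Char)) : List (List Char) :=
  ws.map (fun w => if w ≠ [] then '"' :: (w ++ ['"']) else w)

-- the outer while loop over i; on '"' the inner while that advances `end` is the takeWhile scan,
-- i jumps to end+1 (drop (inner.length + 1)); otherwise the character is copied and i += 1
def pvALoop : List Char → List Char
  | [] => []
  | c :: rest =>
    if c = '"' then
      let inner := rest.takeWhile (fun x => x ≠ '"')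
      List.intercalate [' '] (pvAWrap (List.splitOn ' ' inner)) ++ pvALoop (rest.drop (inner.length + 1))
    else c :: pvALoop rest
termination_by cs => cs.length
decreasing_by
  · simp only [List.length_drop, List.length_cons]; omega
  · simp only [List.length_cons]; omega

def split_terminal_symbols_py (body : String) : String :=
  String.ofList (pvALoop body.toList)

-- ===== PORT B =====
-- ' '.join(f'"{w}"' if w else w for w in part.split(' '))
def pvBTransform (part : List Char) : List Char :=
  List.intercalate [' ']
    ((List.splitOn ' ' part).map (fun w => if w.isEmpty then w else '"' :: (w ++ ['"'])))

def split_terminal_symbols_py_alt (body : String) : String :=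
  String.ofList
    ((((List.splitOn '"' body.toList).zipIdx.map
        (fun p => if p.2 % 2 == 0 then p.1 else pvBTransform p.1)).flatten))

-- ===== PRECONDITION & SPEC =====
def Spec_split_terminal_symbols_py (body : String) (out : String) : Prop := out = split_terminal_symbols_py_alt body
instance (body : String) (out : String) : Decidable (Spec_split_terminal_symbols_py body out) := by unfold Spec_split_terminal_symbols_py; infer_instance

-- ===== CLAIM (what is proved, stated in full; the proofs are below) =====
def Claim_equal_split_terminal_symbols_py : Prop := ∀ (body : String), Dom_split_terminal_symbols_py body → Spec_split_terminal_symbols_py body (split_terminal_symbols_py body)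

-- ===== LEMMAS AND PROOFS =====

-- B's per-part body applied with a running index; only the parity of the start index matters
def pvGlue (k : Nat) (parts : List (List Char)) : List Char :=
  ((parts.zipIdx k).map (fun p => if p.2 % 2 == 0 then p.1 else pvBTransform p.1)).flatten

theorem pvGlue_cons (k : Nat) (p : List Char) (ps : List (List Char)) :
    pvGlue k (p :: ps) = (if k % 2 == 0 then p else pvBTransform p) ++ pvGlue (k + 1) ps := by
  simp [pvGlue, List.zipIdx_cons]

theorem pvAWrap_eq (ws : List (List Char)) :
    pvAWrap ws = ws.map (fun w => if w = [] then w else '"' :: (w ++ ['"'])) := by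
  unfold pvAWrap
  refine List.map_congr_left (fun w _ => ?_)
  cases w <;> simp

theorem pvMain : ∀ (n : Nat) (cs : List Char) (k : Nat), cs.length ≤ n → k % 2 = 0 →
    pvALoop cs = pvGlue k (List.splitOn '"' cs) := by
  intro n
  induction n with
  | zero =>
    intro cs k h hk
    have : cs = [] := List.eq_nil_of_length_eq_zero (Nat.le_zero.mp h)
    subst this
    simp [pvALoop, List.splitOn, List.splitOnP_nil, pvGlue, hk]
  | succ n ih =>
    intro cs k h hk
    cases cs with
    | nil => simp [pvALoop, List.splitOn, List.splitOnP_nil, pvGlue, hk]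
    | cons c rest =>
      by_cases hc : c = '"'
      · subst hc
        rw [pvALoop]
        simp only [if_pos]
        have hsplit : List.splitOn '"' ('"' :: rest) = [] :: List.splitOn '"' rest := by
          simp [List.splitOn, List.splitOnP_cons]
        rw [hsplit, pvGlue_cons]
        simp only [hk, beq_self_eq_true, if_pos, List.nil_append]
        -- decompose rest = inner ++ after
        set inner := rest.takeWhile (fun x => x ≠ '"') with hinner
        have hinner_no : ∀ x ∈ inner, (x ≠ '"') := by
          intro x hx
          have := List.mem_takeWhile_imp (hinner ▸ hx)
          simp at this
          exact this
        have hdecomp : inner ++ rest.dropWhile (fun x => decide (x ≠ '"')) = rest := by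
          simp [hinner, List.takeWhile_append_dropWhile]
        cases hafter : rest.dropWhile (fun x => decide (x ≠ '"')) with
        | nil =>
          -- no closing quote: rest = inner, a single part
          have hrest : rest = inner := by rw [← hdecomp, hafter, List.append_nil]
          have hsingle : List.splitOn '"' rest = [rest] := by
            apply List.splitOnP_eq_single
            intro x hx
            have := hinner_no x (hrest ▸ hx)
            simpa using this
          have hlen : inner.length + 1 > rest.length := by rw [hrest]; omega
          have hdrop : rest.drop (inner.length + 1) = [] := List.drop_eq_nil_of_le (by omega)
          rw [hsingle, pvGlue_cons, hdrop, pvALoop]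
          have hodd : ((k + 1) % 2 == 0) = false := by
            simp only [beq_eq_false_iff_ne, ne_eq]
            omega
          rw [hodd, if_neg (by simp)]
          simp [pvGlue, pvBTransform, pvAWrap_eq, hrest]
        | cons q r =>
          have hne : List.dropWhile (fun x => decide (x ≠ '"')) rest ≠ [] := by
            rw [hafter]; simp
          have hh : (List.dropWhile (fun x => decide (x ≠ '"')) rest).head? = some q := by
            rw [hafter]; rfl
          rw [List.head?_eq_some_head hne] at hh
          have hq : q = '"' := by
            have h1 := List.head_dropWhile_not (p := fun x => decide (x ≠ '"')) (l := rest) hne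
            rw [Option.some.inj hh] at h1
            simpa using h1
          subst hq
          have hrest : rest = inner ++ '"' :: r := by rw [← hdecomp, hafter]
          have hsplit2 : List.splitOn '"' rest = inner :: List.splitOn '"' r := by
            rw [hrest]
            apply List.splitOnP_first
            · intro x hx
              have := hinner_no x hx
              simpa using this
            · simp
          have hdrop : rest.drop (inner.length + 1) = r := by
            rw [hrest]
            simp [List.drop_append]
          rw [hsplit2, pvGlue_cons]
          have hodd : ((k + 1) % 2 == 0) = false := by
            simp only [beq_eq_false_iff_ne, ne_eq]
            omega
          rw [hodd, if_neg (by simp), hdrop]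
          have hr : r.length ≤ n := by
            have : rest.length ≤ n := by simpa using Nat.le_of_succ_le_succ h
            rw [hrest] at this
            simp at this
            omega
          rw [ih r (k + 2) hr (by omega)]
          congr 1
          simp [pvBTransform, pvAWrap_eq]
      · rw [pvALoop]
        rw [if_neg hc]
        have hsplit : List.splitOn '"' (c :: rest) =
            (List.splitOn '"' rest).modifyHead (c :: ·) := by
          simp [List.splitOn, List.splitOnP_cons, hc]
        obtain ⟨p, ps, hps⟩ := List.exists_cons_of_ne_nil
          (List.splitOnP_ne_nil (fun x => x == '"') rest)
        have hps' : List.splitOn '"' rest = p :: ps := hps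
        rw [hsplit, hps', List.modifyHead_cons, pvGlue_cons,
          ih rest k (Nat.le_of_succ_le_succ h) hk, hps', pvGlue_cons]
        simp [hk]

-- ===== VERDICT (by name: the statement is the Claim_ definition above) =====
theorem split_terminal_symbols_py_spec : Claim_equal_split_terminal_symbols_py := by
  intro body _
  unfold Spec_split_terminal_symbols_py split_terminal_symbols_py split_terminal_symbols_py_alt
  congr 1
  exact pvMain body.toList.length body.toList 0 le_rfl rfl
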